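-- pv_equiv track=rewrite | github.com/pleielp/apss-py | chapter20/PALINDROMIZE/taeyoung.py | max_overlap
-- ===== SOURCE A (Python) =====
-- def get_partial_match(N):
--     pi = [0] * len(N)
--     begin, matched = 1, 0
--     while begin + matched < len(N):
--         if N[begin+matched] == N[matched]:
--             matched += 1
--             pi[begin+matched-1] = matched
--         else:
--             if matched == 0:
--                 begin += 1
--             else:
--                 begin += matched - pi[matched-1]
--                 matched = pi[matched-1]
--
--     return pi
--
-- def max_overlap(a, b):
--     pi = get_partial_match(b)
--     begin, matched = 0, 0
--
--     while begin < len(a):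
--         if matched < len(b) and a[begin + matched] == b[matched]:
--             matched += 1
--             if begin + matched == len(a):
--                 return matched
--         else:
--             if matched == 0:
--                 begin += 1
--             else:
--                 begin += matched - pi[matched-1]
--                 matched = pi[matched-1]
-- ===== SOURCE B (Python) =====
-- def max_overlap(a, b):
--     for k in range(min(len(a), len(b)), 0, -1):
--         if a[len(a)-k:] == b[:k]:
--             return k
--     return None
-- ===== Notes on version B (the rewrite author's own statement) =====
-- stated objective: simpler
-- what changed: Replaces the KMP failure-table construction and scan with a direct downward loop that returns the first k = min(len(a),len(b))..1 with a[-k:] == b[:k].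
import Mathlib
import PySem

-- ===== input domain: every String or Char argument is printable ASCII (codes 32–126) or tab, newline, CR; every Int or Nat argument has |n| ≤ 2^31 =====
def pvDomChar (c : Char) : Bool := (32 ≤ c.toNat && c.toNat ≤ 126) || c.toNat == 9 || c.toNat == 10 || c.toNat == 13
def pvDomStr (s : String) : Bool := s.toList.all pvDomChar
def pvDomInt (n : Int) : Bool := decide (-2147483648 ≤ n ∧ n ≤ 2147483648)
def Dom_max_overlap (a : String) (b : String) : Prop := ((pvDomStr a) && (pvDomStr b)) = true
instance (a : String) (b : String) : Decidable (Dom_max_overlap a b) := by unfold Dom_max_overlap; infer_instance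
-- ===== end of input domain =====

-- B replaces A's KMP failure-table construction and scan by a plain downward loop over
-- candidate overlap lengths, returning the first k with a[-k:] == b[:k]; same return value,
-- simpler code (no speed claim).

-- ===== PORT A =====
-- literal port of get_partial_match's while loop; the fuel argument is only a
-- termination guard (2*len(N)+1 steps always suffice, proved below) and never
-- changes the result on any input.
def gpmLoop (N : List Char) : Nat → List Nat → Nat → Nat → List Nat
  | 0, pi, _, _ => pi
  | fuel+1, pi, bg, m =>
    if bg + m < N.length then
      if N[bg+m]? = N[m]? then
        gpmLoop N fuel (pi.set (bg+m) (m+1)) bg (m+1)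
      else if m = 0 then gpmLoop N fuel pi (bg+1) 0
      else gpmLoop N fuel pi (bg + m - pi.getD (m-1) 0) (pi.getD (m-1) 0)
    else pi

def get_partial_match (N : List Char) : List Nat :=
  gpmLoop N (2*N.length+1) (List.replicate N.length 0) 1 0

-- literal port of max_overlap's while loop, same fuel-guard remark.
def moLoop (A B : List Char) (pi : List Nat) : Nat → Nat → Nat → Option Int
  | 0, _, _ => none
  | fuel+1, bg, m =>
    if bg < A.length then
      if m < B.length ∧ A[bg+m]? = B[m]? then
        if bg + (m+1) = A.length then some ((m+1 : Nat) : Int)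
        else moLoop A B pi fuel bg (m+1)
      else if m = 0 then moLoop A B pi fuel (bg+1) 0
      else moLoop A B pi fuel (bg + m - pi.getD (m-1) 0) (pi.getD (m-1) 0)
    else none

def max_overlap (a : String) (b : String) : Option Int :=
  moLoop a.toList b.toList (get_partial_match b.toList)
    (2*a.toList.length + b.toList.length + 2) 0 0

-- ===== PORT B =====
-- port of Source B: for k in range(min(len(a),len(b)), 0, -1): if a[len(a)-k:] == b[:k]: return k
def altScan (A B : List Char) : Nat → Option Int
  | 0 => none
  | k+1 => if A.drop (A.length - (k+1)) = B.take (k+1) then some ((k+1 : Nat) : Int)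
           else altScan A B k

def max_overlap_alt (a : String) (b : String) : Option Int :=
  altScan a.toList b.toList (min a.toList.length b.toList.length)

-- ===== PRECONDITION & SPEC =====
def Spec_max_overlap (a : String) (b : String) (out : Option Int) : Prop := out = max_overlap_alt a b
instance (a : String) (b : String) (out : Option Int) : Decidable (Spec_max_overlap a b out) := by unfold Spec_max_overlap; infer_instance

-- ===== CLAIM (what is proved, stated in full; the proofs are below) =====
def Claim_equal_max_overlap : Prop := ∀ (a : String) (b : String), Dom_max_overlap a b → Spec_max_overlap a b (max_overlap a b)

-- ===== LEMMAS AND PROOFS =====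

-- "k is a (positive) overlap: the k-prefix of Y is the k-suffix of X"
def ovp (X Y : List Char) (k : Nat) : Prop :=
  0 < k ∧ k ≤ X.length ∧ k ≤ Y.length ∧ Y.take k = X.drop (X.length - k)

-- "o is the maximal overlap (none if there is no positive overlap)"
def isMaxOv (X Y : List Char) : Option Int → Prop
  | none => ∀ k, ¬ ovp X Y k
  | some z => ∃ k : Nat, (k : Int) = z ∧ ovp X Y k ∧ ∀ j, ovp X Y j → j ≤ k

-- "r is a border of l: the r-prefix equals the r-suffix"
def isBorder (l : List Char) (r : Nat) : Prop :=
  r ≤ l.length ∧ l.take r = l.drop (l.length - r)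

-- "pi[j] is the longest proper border of N.take (j+1)"
def PiG (N : List Char) (pi : List Nat) (j : Nat) : Prop :=
  pi.getD j 0 ≤ j ∧ isBorder (N.take (j+1)) (pi.getD j 0) ∧
    ∀ r, r ≤ j → isBorder (N.take (j+1)) r → r ≤ pi.getD j 0

-- ---- small list lemmas ----
lemma take_eq_of_take_eq {α : Type} {l1 l2 : List α} {q r : Nat}
    (h : l1.take q = l2.take q) (hr : r ≤ q) : l1.take r = l2.take r := by
  have h2 := congrArg (List.take r) h
  simpa [List.take_take, Nat.min_eq_left hr] using h2

lemma getElem?_of_take_eq {α : Type} {l1 l2 : List α} {q r : Nat}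
    (h : l1.take q = l2.take q) (hr : r < q) : l1[r]? = l2[r]? := by
  have h2 := congrArg (fun l : List α => l[r]?) h
  simpa [List.getElem?_take_of_lt hr] using h2

lemma take_succ_eq {α : Type} {l1 l2 : List α} {m : Nat}
    (h : l1.take m = l2.take m) (he : l1[m]? = l2[m]?) :
    l1.take (m+1) = l2.take (m+1) := by
  rw [List.take_add_one, List.take_add_one, h, he]

lemma drop_take_drop {α : Type} (l : List α) (b m d : Nat) :
    ((l.drop b).take m).drop d = (l.drop (b+d)).take (m-d) := by
  rw [List.drop_take, List.drop_drop]

lemma getD_set_self (l : List Nat) (i v : Nat) (h : i < l.length) :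
    (l.set i v).getD i 0 = v := by
  simp [List.getD, h]

lemma getD_set_ne (l : List Nat) {i j : Nat} (v : Nat) (h : j ≠ i) :
    (l.set i v).getD j 0 = l.getD j 0 := by
  simp [List.getD, List.getElem?_set_ne (by omega : i ≠ j)]

lemma getD_replicate (n j : Nat) : (List.replicate n (0:Nat)).getD j 0 = 0 := by
  simp [List.getD]

-- a match of the prefix of N at shift t inside the currently matched window is a border
lemma border_of_shift {N X : List Char} {bg t m : Nat}
    (hS2 : N.take m = (X.drop bg).take m) (hbt : bg ≤ t) (htm : t ≤ bg + m)
    (hmN : m ≤ N.length)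
    (hmatch : N.take (bg + m - t) = (X.drop t).take (bg + m - t)) :
    isBorder (N.take m) (bg + m - t) := by
  have hlen : (N.take m).length = m := by simp [Nat.min_eq_left hmN]
  refine ⟨by omega, ?_⟩
  rw [hlen]
  have h1 : (N.take m).take (bg + m - t) = N.take (bg + m - t) := by
    rw [List.take_take, Nat.min_eq_left (by omega)]
  have h2 : (N.take m).drop (m - (bg + m - t)) = (X.drop t).take (bg + m - t) := by
    rw [hS2, drop_take_drop]
    have e1 : bg + (m - (bg + m - t)) = t := by omega
    have e2 : m - (m - (bg + m - t)) = bg + m - t := by omega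
    rw [e1, e2]
  rw [h1, h2, hmatch]

-- ---- correctness of the failure table ----
lemma gpm_inv (N : List Char) : ∀ (fuel bg m : Nat) (pi : List Nat),
    1 ≤ bg →
    pi.length = N.length →
    N.take m = (N.drop bg).take m →
    (∀ j, j < bg + m → j < N.length → PiG N pi j) →
    (∀ j, bg + m ≤ j → pi.getD j 0 = 0) →
    (∀ t, 1 ≤ t → t < bg → ¬ (N.take (bg+m+1-t) = (N.drop t).take (bg+m+1-t))) →
    2*N.length ≤ fuel + (2*bg + m) →
    (gpmLoop N fuel pi bg m).length = N.length ∧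
      ∀ j, j < N.length → PiG N (gpmLoop N fuel pi bg m) j := by
  intro fuel
  induction fuel with
  | zero =>
    intro bg m pi hbg hlen hS2 hG4 hG6 hG5 hfuel
    simp only [gpmLoop]
    exact ⟨hlen, fun j hj => hG4 j (by omega) hj⟩
  | succ fuel ih =>
    intro bg m pi hbg hlen hS2 hG4 hG6 hG5 hfuel
    simp only [gpmLoop]
    by_cases hlt : bg + m < N.length
    · rw [if_pos hlt]
      by_cases hmatch : N[bg+m]? = N[m]?
      · -- matched += 1; pi[begin+matched-1] = matched
        rw [if_pos hmatch]
        have hS2' : N.take (m+1) = (N.drop bg).take (m+1) := by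
          refine take_succ_eq hS2 ?_
          rw [List.getElem?_drop]
          exact hmatch.symm
        refine ih bg (m+1) (pi.set (bg+m) (m+1)) hbg (by simp [hlen]) hS2' ?_ ?_ ?_ (by omega)
        · -- G4
          intro j hj hjN
          rcases Nat.lt_or_ge j (bg+m) with hjlt | hjge
          · have h := hG4 j hjlt hjN
            unfold PiG at h ⊢
            rwa [getD_set_ne pi (m+1) (by omega)]
          · have hjeq : j = bg + m := by omega
            subst hjeq
            unfold PiG
            rw [getD_set_self pi (bg+m) (m+1) (by omega)]
            have hlen1 : (N.take (bg+m+1)).length = bg+m+1 := by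
              simp [Nat.min_eq_left (by omega : bg+m+1 ≤ N.length)]
            refine ⟨by omega, ⟨by omega, ?_⟩, ?_⟩
            · -- border of length m+1
              rw [hlen1]
              have h1 : (N.take (bg+m+1)).take (m+1) = N.take (m+1) := by
                rw [List.take_take, Nat.min_eq_left (by omega)]
              have h2 : (N.take (bg+m+1)).drop (bg+m+1-(m+1)) = (N.drop bg).take (m+1) := by
                have e : bg+m+1-(m+1) = bg := by omega
                rw [e, List.drop_take]
                congr 1
                omega
              rw [h1, h2]
              exact hS2'
            · -- maximality
              intro r hr hb
              by_contra hc
              push Not at hc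
              obtain ⟨hrlen, heq⟩ := hb
              rw [hlen1] at heq
              have hNr : N.take r = (N.drop (bg+m+1-r)).take r := by
                have h1 : (N.take (bg+m+1)).take r = N.take r := by
                  rw [List.take_take, Nat.min_eq_left (by omega)]
                have h2 : (N.take (bg+m+1)).drop (bg+m+1-r) = (N.drop (bg+m+1-r)).take r := by
                  rw [List.drop_take]
                  congr 1
                  omega
                rw [← h1, heq, h2]
              refine hG5 (bg+m+1-r) (by omega) (by omega) ?_
              have e : bg+m+1-(bg+m+1-r) = r := by omega
              rw [e]
              exact hNr
        · -- G6
          intro j hj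
          rw [getD_set_ne pi (m+1) (by omega)]
          exact hG6 j (by omega)
        · -- G5
          intro t ht1 htb heq
          refine hG5 t ht1 htb ?_
          exact take_eq_of_take_eq heq (by omega)
      · rw [if_neg hmatch]
        by_cases hm0 : m = 0
        · -- begin += 1 (matched == 0)
          subst hm0
          rw [if_pos rfl]
          -- start bg is ruled out by the mismatch N[bg] ≠ N[0]
          have hrule : ∀ r, 1 ≤ r → ¬ (N.take r = (N.drop bg).take r) := by
            intro r hr heq
            have h0 : N[0]? = (N.drop bg)[0]? := getElem?_of_take_eq heq (by omega)
            rw [List.getElem?_drop] at h0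
            exact hmatch (by simpa using h0.symm)
          refine ih (bg+1) 0 pi hbg.step hlen rfl ?_ (fun j hj => hG6 j (by omega)) ?_ (by omega)
          · -- G4, new entry j = bg
            intro j hj hjN
            rcases Nat.lt_or_ge j bg with hjlt | hjge
            · exact hG4 j (by omega) hjN
            · have hjeq : j = bg := by omega
              rw [hjeq]
              unfold PiG
              rw [hG6 bg (by omega)]
              refine ⟨Nat.zero_le _, ⟨Nat.zero_le _, by simp⟩, ?_⟩
              intro r hr hb
              by_contra hc
              push Not at hc
              obtain ⟨hrlen, heq⟩ := hb
              have hlen1 : (N.take (bg+1)).length = bg+1 := by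
                simp [Nat.min_eq_left (by omega : bg+1 ≤ N.length)]
              rw [hlen1] at heq
              have hNr : N.take r = (N.drop (bg+1-r)).take r := by
                have h1 : (N.take (bg+1)).take r = N.take r := by
                  rw [List.take_take, Nat.min_eq_left (by omega)]
                have h2 : (N.take (bg+1)).drop (bg+1-r) = (N.drop (bg+1-r)).take r := by
                  rw [List.drop_take]
                  congr 1
                  omega
                rw [← h1, heq, h2]
              rcases Nat.lt_or_ge (bg+1-r) bg with htlt | htge
              · refine hG5 (bg+1-r) (by omega) htlt ?_
                have e : bg+0+1-(bg+1-r) = r := by omega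
                rw [e]
                exact hNr
              · have e : bg+1-r = bg := by omega
                rw [e] at hNr
                exact hrule r (by omega) hNr
          · -- G5
            intro t ht1 htb heq
            rcases Nat.lt_or_ge t bg with htlt | htge
            · refine hG5 t ht1 htlt ?_
              exact take_eq_of_take_eq heq (by omega)
            · have e : t = bg := by omega
              subst e
              exact hrule (t+0+1+1-t) (by omega) (take_eq_of_take_eq heq (by omega))
        · -- begin += matched - pi[matched-1]; matched = pi[matched-1]
          rw [if_neg hm0]
          have hmN : m ≤ N.length := by omega
          obtain ⟨hple, ⟨hpbl, hpb⟩, hpmax⟩ := hG4 (m-1) (by omega) (by omega)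
          set p := pi.getD (m-1) 0 with hp
          have hm1 : m - 1 + 1 = m := by omega
          rw [hm1] at hpbl hpb hpmax
          have hlenm : (N.take m).length = m := by simp [Nat.min_eq_left hmN]
          rw [hlenm] at hpb
          have hS2' : N.take p = (N.drop (bg + m - p)).take p := by
            have h1 : (N.take m).take p = N.take p := by
              rw [List.take_take, Nat.min_eq_left (by omega)]
            have h2 : (N.take m).drop (m - p) = (N.drop (bg + m - p)).take p := by
              rw [hS2, drop_take_drop]
              have e1 : bg+(m-p) = bg+m-p := by omega
              have e2 : m-(m-p) = p := by omega
              rw [e1, e2]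
            rw [← h1, hpb, h2]
          refine ih (bg + m - p) p pi (by omega) hlen hS2'
            (fun j hj hjN => hG4 j (by omega) hjN)
            (fun j hj => hG6 j (by omega)) ?_ (by omega)
          -- G5
          intro t ht1 htb heq
          have e : bg + m - p + p + 1 - t = bg + m + 1 - t := by omega
          rw [e] at heq
          rcases Nat.lt_or_ge t bg with htlt | htge
          · exact hG5 t ht1 htlt heq
          · rcases Nat.eq_or_lt_of_le htge with hteq | htgt
            · -- t = bg: full match would contradict the character mismatch
              rw [← hteq] at heq
              have e2 : bg + m + 1 - bg = m + 1 := by omega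
              rw [e2] at heq
              have h0 : N[m]? = (N.drop bg)[m]? := getElem?_of_take_eq heq (by omega)
              rw [List.getElem?_drop] at h0
              exact hmatch h0.symm
            · -- bg < t < bg+m-p: would be a border of N.take m longer than p
              have hr1 : bg + m - t ≤ m - 1 := by omega
              have hmr : N.take (bg + m - t) = (N.drop t).take (bg + m - t) :=
                take_eq_of_take_eq heq (by omega)
              have hbord := border_of_shift hS2 (by omega) (by omega) hmN hmr
              have := hpmax (bg + m - t) hr1 hbord
              omega
    · rw [if_neg hlt]
      exact ⟨hlen, fun j hj => hG4 j (by omega) hj⟩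

lemma gpm_good (N : List Char) :
    (get_partial_match N).length = N.length ∧
      ∀ j, j < N.length → PiG N (get_partial_match N) j := by
  unfold get_partial_match
  refine gpm_inv N (2*N.length+1) 1 0 (List.replicate N.length 0) le_rfl
    (by simp) rfl ?_ (fun j _ => getD_replicate _ _) (by omega) (by omega)
  intro j hj hjN
  have hj0 : j = 0 := by omega
  subst hj0
  unfold PiG
  rw [getD_replicate]
  exact ⟨le_rfl, ⟨Nat.zero_le _, by simp⟩, fun r hr _ => by omega⟩

-- ---- correctness of the KMP scan ----
lemma mo_inv (A B : List Char) (pi : List Nat)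
    (hpi : ∀ j, j < B.length → PiG B pi j) :
    ∀ (fuel bg m : Nat),
    (m = 0 ∨ bg + m < A.length) →
    m ≤ B.length →
    B.take m = (A.drop bg).take m →
    (∀ k, ovp A B k → k + bg ≤ A.length) →
    2*A.length + B.length + 1 ≤ fuel + (2*bg + m) →
    isMaxOv A B (moLoop A B pi fuel bg m) := by
  intro fuel
  induction fuel with
  | zero =>
    intro bg m hS0 hS1 hS2 hS3 hfuel
    simp only [moLoop, isMaxOv]
    intro k hk
    have h1 := hS3 k hk
    have h2 := hk.1
    omega
  | succ fuel ih =>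
    intro bg m hS0 hS1 hS2 hS3 hfuel
    simp only [moLoop]
    by_cases hb : bg < A.length
    · rw [if_pos hb]
      by_cases hc : m < B.length ∧ A[bg+m]? = B[m]?
      · -- matched += 1
        rw [if_pos hc]
        obtain ⟨hmB, hch⟩ := hc
        have hS2' : B.take (m+1) = (A.drop bg).take (m+1) :=
          take_succ_eq hS2 (by rw [List.getElem?_drop]; exact hch.symm)
        by_cases hret : bg + (m+1) = A.length
        · -- return matched
          rw [if_pos hret]
          simp only [isMaxOv]
          refine ⟨m+1, rfl, ⟨by omega, by omega, by omega, ?_⟩, ?_⟩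
          · have e : A.length - (m+1) = bg := by omega
            rw [e]
            have hfull : (A.drop bg).take (m+1) = A.drop bg :=
              List.take_of_length_le (by simp; omega)
            rw [hS2', hfull]
          · intro j hj
            have := hS3 j hj
            omega
        · rw [if_neg hret]
          have hslt : bg + m < A.length := by
            rcases hS0 with h | h
            · omega
            · exact h
          exact ih bg (m+1) (Or.inr (by omega)) (by omega) hS2' hS3 (by omega)
      · rw [if_neg hc]
        by_cases hm0 : m = 0
        · -- begin += 1
          subst hm0
          rw [if_pos rfl]
          refine ih (bg+1) 0 (Or.inl rfl) (Nat.zero_le _) rfl ?_ (by omega)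
          intro k hk
          have hold := hS3 k hk
          by_contra hcon
          push Not at hcon
          obtain ⟨hk0, hkA, hkB, hkeq⟩ := hk
          have e : A.length - k = bg := by omega
          rw [e] at hkeq
          have h1 : (A.drop bg).take k = A.drop bg := List.take_of_length_le (by simp; omega)
          have h0 : B[0]? = (A.drop bg)[0]? := getElem?_of_take_eq (by rw [hkeq, h1]) hk0
          rw [List.getElem?_drop] at h0
          exact hc ⟨by omega, by simpa using h0.symm⟩
        · -- begin += matched - pi[matched-1]; matched = pi[matched-1]
          rw [if_neg hm0]
          have hslt : bg + m < A.length := by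
            rcases hS0 with h | h
            · omega
            · exact h
          obtain ⟨hple, ⟨hpbl, hpb⟩, hpmax⟩ := hpi (m-1) (by omega)
          set p := pi.getD (m-1) 0 with hpdef
          have e1 : m-1+1 = m := by omega
          rw [e1] at hpb hpmax
          have hlenm : (B.take m).length = m := by simp [Nat.min_eq_left hS1]
          rw [hlenm] at hpb
          have hS2' : B.take p = (A.drop (bg+m-p)).take p := by
            have h1 : (B.take m).take p = B.take p := by
              rw [List.take_take, Nat.min_eq_left (by omega)]
            have h2 : (B.take m).drop (m-p) = (A.drop (bg+m-p)).take p := by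
              rw [hS2, drop_take_drop]
              have e2 : bg+(m-p) = bg+m-p := by omega
              have e3 : m-(m-p) = p := by omega
              rw [e2, e3]
            rw [← h1, hpb, h2]
          refine ih (bg+m-p) p ?_ (by omega) hS2' ?_ (by omega)
          · rcases Nat.eq_zero_or_pos p with h0 | hpos
            · exact Or.inl h0
            · exact Or.inr (by omega)
          · intro k hk
            have hold := hS3 k hk
            by_contra hcon
            push Not at hcon
            obtain ⟨hk0, hkA, hkB, hkeq⟩ := hk
            set t := A.length - k with ht
            have htbg : bg ≤ t := by omega
            have htlt : t < bg+m-p := by omega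
            rcases Nat.eq_or_lt_of_le htbg with hteq | htgt
            · -- t = bg: the character at m would match, contradicting the mismatch
              rw [← hteq] at hkeq
              have hkm : m < k := by omega
              have h1 : (A.drop bg).take k = A.drop bg := List.take_of_length_le (by simp; omega)
              have h0 : B[m]? = (A.drop bg)[m]? := getElem?_of_take_eq (by rw [hkeq, h1]) hkm
              rw [List.getElem?_drop] at h0
              exact hc ⟨by omega, h0.symm⟩
            · -- bg < t < bg+m-p: would be a border of B.take m longer than p
              have hr : bg + m - t ≤ m - 1 := by omega
              have h1 : (A.drop t).take k = A.drop t := List.take_of_length_le (by simp; omega)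
              have hmr : B.take (bg+m-t) = (A.drop t).take (bg+m-t) :=
                take_eq_of_take_eq (by rw [hkeq, h1]) (by omega)
              have hbord := border_of_shift hS2 htbg (by omega) hS1 hmr
              have := hpmax (bg+m-t) hr hbord
              omega
    · rw [if_neg hb]
      simp only [isMaxOv]
      intro k hk
      have h1 := hS3 k hk
      have h2 := hk.1
      omega

-- ---- correctness of the downward scan ----
lemma alt_isMax (X Y : List Char) : ∀ (K : Nat), K ≤ X.length → K ≤ Y.length →
    (∀ j, ovp X Y j → j ≤ K) → isMaxOv X Y (altScan X Y K) := by
  intro K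
  induction K with
  | zero =>
    intro _ _ hmax
    simp only [altScan, isMaxOv]
    intro k hk
    have h1 := hmax k hk
    have h2 := hk.1
    omega
  | succ K ih =>
    intro hX hY hmax
    simp only [altScan]
    by_cases hc : X.drop (X.length - (K+1)) = Y.take (K+1)
    · simp only [if_pos hc, isMaxOv]
      exact ⟨K+1, rfl, ⟨by omega, hX, hY, hc.symm⟩, fun j hj => hmax j hj⟩
    · simp only [if_neg hc]
      refine ih (by omega) (by omega) ?_
      intro j hj
      have hjK := hmax j hj
      rcases Nat.lt_or_ge j (K+1) with h | h
      · omega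
      · have : j = K+1 := by omega
        subst this
        exact absurd hj.2.2.2.symm hc

lemma isMaxOv_unique {X Y : List Char} {o₁ o₂ : Option Int}
    (h₁ : isMaxOv X Y o₁) (h₂ : isMaxOv X Y o₂) : o₁ = o₂ := by
  match o₁, o₂ with
  | none, none => rfl
  | none, some z =>
    obtain ⟨k, _, hk, _⟩ := h₂
    exact absurd hk (h₁ k)
  | some z, none =>
    obtain ⟨k, _, hk, _⟩ := h₁
    exact absurd hk (h₂ k)
  | some z₁, some z₂ =>
    obtain ⟨k₁, e₁, hk₁, m₁⟩ := h₁
    obtain ⟨k₂, e₂, hk₂, m₂⟩ := h₂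
    have : k₁ = k₂ := Nat.le_antisymm (m₂ k₁ hk₁) (m₁ k₂ hk₂)
    simp [← e₁, ← e₂, this]

lemma main_eq (a b : String) : max_overlap a b = max_overlap_alt a b := by
  unfold max_overlap max_overlap_alt
  obtain ⟨hlen, hpi⟩ := gpm_good b.toList
  have h1 := mo_inv a.toList b.toList (get_partial_match b.toList) hpi
    (2*a.toList.length + b.toList.length + 2) 0 0 (Or.inl rfl) (Nat.zero_le _)
    rfl (fun k hk => by have := hk.2.1; omega) (by omega)
  have h2 := alt_isMax a.toList b.toList (min a.toList.length b.toList.length)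
    (Nat.min_le_left _ _) (Nat.min_le_right _ _)
    (fun j hj => Nat.le_min.mpr ⟨hj.2.1, hj.2.2.1⟩)
  exact isMaxOv_unique h1 h2

-- ===== VERDICT (by name: the statement is the Claim_ definition above) =====
theorem max_overlap_spec : Claim_equal_max_overlap := by
  intro a b _
  exact main_eq a b
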